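-- pv_equiv track=rewrite | github.com/wxxedu/md2anki | Conversions/stripList.py | largeBracketsSpacer
-- ===== SOURCE A (Python) =====
-- def subString(string,position,changeTo):
-- 	new = []
-- 	for s in string:
-- 		new.append(s)
-- 	new[position] = changeTo
-- 	return "".join(new)
--
-- def largeBracketsSpacer(line):
-- 	for index in range (1, len(line) - 1):
-- 		if line[index] + line[index + 1] == "{{":
-- 			line = subString(line, index, "¡")
-- 		if line[index] + line[index + 1] == "}}":
-- 			line = subString(line, index, "™")
-- 	line = line.replace("¡", "{ ")
-- 	line = line.replace("™", "} ")
-- 	return line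
-- ===== SOURCE B (Python) =====
-- def largeBracketsSpacer(line):
--     n = len(line)
--     out = []
--     for i, c in enumerate(line):
--         if 1 <= i < n - 1 and c == line[i + 1] and (c == "{" or c == "}"):
--             out.append(c + " ")
--         else:
--             out.append(c)
--     return "".join(out)
-- ===== Notes on version B (the rewrite author's own statement) =====
-- stated objective: simpler
-- what changed: A scans the string marking doubled braces with sentinel characters via subString (which rebuilds the whole string per replacement) and then runs two str.replace passes; B makes one left-to-right pass over enumerate(line), emitting the character plus a space exactly where a doubled brace starts at index >= 1, and joins once.
import Mathlib
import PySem

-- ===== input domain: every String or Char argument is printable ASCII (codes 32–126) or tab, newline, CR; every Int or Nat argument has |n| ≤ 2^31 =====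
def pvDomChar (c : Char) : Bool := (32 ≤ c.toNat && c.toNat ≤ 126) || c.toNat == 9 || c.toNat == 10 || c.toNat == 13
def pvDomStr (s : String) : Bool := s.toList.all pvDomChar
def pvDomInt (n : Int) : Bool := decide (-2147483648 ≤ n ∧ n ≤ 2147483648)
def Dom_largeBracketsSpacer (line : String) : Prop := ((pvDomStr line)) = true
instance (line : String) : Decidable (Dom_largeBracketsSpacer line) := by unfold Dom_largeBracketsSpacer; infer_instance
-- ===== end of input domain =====

-- B replaces A's mark-with-sentinel-chars-then-replace passes by a single left-to-right pass that
-- emits each first character of a doubled brace followed by a space (objective: simpler).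

-- ===== PORT A =====
-- subString: rebuild the string as a list of 1-char strings, assign at `position`, join.
-- `position` is in range at every call site (loop indices 1..len-2), so pySetD is exact here.
def pvSubString (string : String) (position : Int) (changeTo : String) : String :=
  let new : List String := string.toList.map (fun s => String.ofList [s])
  let new := PySem.List.pySetD new position changeTo
  PySem.Str.join "" new
-- loop body of A; indices `index`, `index+1` are in range (1..len-1) at every call, so `.getD ' '`
-- after pyGet? is exact for the concatenation line[index] + line[index+1]
def pvLoopBody (line : String) (index : Int) : String :=
  let line :=
    if String.ofList [(PySem.Str.pyGet? line index).getD ' ',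
                      (PySem.Str.pyGet? line (index + 1)).getD ' '] = "{{"
    then pvSubString line index "¡" else line
  if String.ofList [(PySem.Str.pyGet? line index).getD ' ',
                    (PySem.Str.pyGet? line (index + 1)).getD ' '] = "}}"
  then pvSubString line index "™" else line

def largeBracketsSpacer (line : String) : String :=
  let line := (PySem.List.pyRange 1 (PySem.Str.len line - 1) 1).foldl pvLoopBody line
  let line := PySem.Str.replace line "¡" "{ "
  PySem.Str.replace line "™" "} "

-- ===== PORT B =====
def largeBracketsSpacer_alt (line : String) : String :=
  let n : Int := PySem.Str.len line
  let out := (PySem.List.enumerate line.toList).map (fun ic =>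
    if 1 ≤ ic.1 ∧ ic.1 < n - 1 ∧ PySem.Str.pyGet? line (ic.1 + 1) = some ic.2 ∧ (ic.2 = '{' ∨ ic.2 = '}')
    then String.ofList [ic.2, ' '] else String.ofList [ic.2])
  PySem.Str.join "" out

-- ===== PRECONDITION & SPEC =====
def Spec_largeBracketsSpacer (line : String) (out : String) : Prop := out = largeBracketsSpacer_alt line
instance (line : String) (out : String) : Decidable (Spec_largeBracketsSpacer line out) := by unfold Spec_largeBracketsSpacer; infer_instance

-- ===== CLAIM (what is proved, stated in full; the proofs are below) =====
def Claim_equal_largeBracketsSpacer : Prop := ∀ (line : String), Dom_largeBracketsSpacer line → Spec_largeBracketsSpacer line (largeBracketsSpacer line)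

-- ===== LEMMAS AND PROOFS =====
-- pvGood cs i: position i of cs holds the first char of a doubled brace, with i ≥ 1 (A's loop
-- starts at 1) and i+1 < |cs|; pvMarkTo cs k marks every such position below k with A's sentinel
def pvGood (cs : List Char) (i : Nat) : Bool :=
  decide (1 ≤ i) && decide (i + 1 < cs.length) && decide (cs[i+1]? = cs[i]?) &&
    (decide (cs[i]? = some '{') || decide (cs[i]? = some '}'))
def pvMarker (c : Char) : Char := if c = '{' then '¡' else '™'
def pvMarkTo (cs : List Char) (k : Nat) : List Char :=
  cs.mapIdx (fun i c => if i < k ∧ pvGood cs i then pvMarker c else c)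
def pvMarkAll (cs : List Char) : List Char :=
  cs.mapIdx (fun i c => if pvGood cs i then pvMarker c else c)

theorem pvJoinNil (L : List (List Char)) : PySem.Chars.join [] L = L.flatten := by
  induction L with
  | nil => rfl
  | cons x xs ih =>
    cases xs with
    | nil => simp [PySem.Chars.join, List.intercalate]
    | cons y ys =>
      simp [PySem.Chars.join, List.intercalate] at ih ⊢
      simpa using ih

theorem pvSubStringEq (ms : List Char) (k : Nat) (c : Char) (hk : k < ms.length) :
    pvSubString (String.ofList ms) (k : Int) (String.ofList [c]) = String.ofList (ms.set k c) := by
  unfold pvSubString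
  simp only [String.toList_ofList]
  have hset : PySem.List.pySetD (ms.map fun s => String.ofList [s]) (k : Int) (String.ofList [c])
      = (ms.map fun s => String.ofList [s]).set k (String.ofList [c]) := by
    simp [PySem.List.pySetD, PySem.List.pySet?, PySem.List.pyIdx?, hk]
  rw [hset, ← List.map_set]
  apply String.ofList_inj.mpr
  simpa [List.map_map, Function.comp_def] using PySem.Chars.join_nil_singletons (ms.set k c)

theorem pvMarkTo_get_ge (cs : List Char) (k i : Nat) (h : k ≤ i) :
    (pvMarkTo cs k)[i]? = cs[i]? := by
  by_cases hi : i < cs.length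
  · simp [pvMarkTo, hi, Nat.not_lt.mpr h]
  · simp [pvMarkTo, Nat.not_lt.mp hi]

theorem pvMarkTo_one (cs : List Char) : pvMarkTo cs 1 = cs := by
  apply List.ext_getElem (by simp [pvMarkTo])
  intro i h1 h2
  simp only [pvMarkTo, List.getElem_mapIdx]
  have : ¬ (i < 1 ∧ pvGood cs i = true) := by
    rintro ⟨hi, hg⟩
    interval_cases i
    simp [pvGood] at hg
  rw [if_neg this]

theorem pvMarkTo_eq_all (cs : List Char) (k : Nat) (h : cs.length ≤ k + 1) :
    pvMarkTo cs k = pvMarkAll cs := by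
  apply List.ext_getElem (by simp [pvMarkTo, pvMarkAll])
  intro i h1 h2
  simp only [pvMarkTo, pvMarkAll, List.getElem_mapIdx]
  by_cases hg : pvGood cs i = true
  · have : i + 1 < cs.length := by
      simp [pvGood] at hg; omega
    have : i < k := by omega
    simp [hg, this]
  · simp [hg]

theorem pvMarkAll_short (cs : List Char) (h : cs.length ≤ 2) : pvMarkAll cs = cs := by
  apply List.ext_getElem (by simp [pvMarkAll])
  intro i h1 h2
  simp only [pvMarkAll, List.getElem_mapIdx]
  have : ¬ pvGood cs i = true := by
    simp [pvGood]; intro h1' h2'; omega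
  simp [this]

theorem pvMarkTo_length (cs : List Char) (k : Nat) : (pvMarkTo cs k).length = cs.length := by
  simp [pvMarkTo]

theorem pvMarkTo_set (cs : List Char) (k : Nat) (hg : pvGood cs k = true) (hk : k < cs.length) :
    (pvMarkTo cs k).set k (pvMarker cs[k]) = pvMarkTo cs (k+1) := by
  apply List.ext_getElem (by simp [pvMarkTo])
  intro i h1 h2
  rw [List.getElem_set]
  by_cases hik : k = i
  · subst hik
    rw [if_pos rfl]
    simp only [pvMarkTo, List.getElem_mapIdx]
    rw [if_pos ⟨Nat.lt_succ_self _, hg⟩]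
  · rw [if_neg hik]
    simp only [pvMarkTo, List.getElem_mapIdx]
    have hiff : (i < k ∧ pvGood cs i = true) ↔ (i < k + 1 ∧ pvGood cs i = true) := by
      constructor
      · rintro ⟨a, b⟩; exact ⟨by omega, b⟩
      · rintro ⟨a, b⟩; exact ⟨by omega, b⟩
    simp only [hiff]
theorem pvMarkTo_noset (cs : List Char) (k : Nat) (hg : ¬ pvGood cs k = true) :
    pvMarkTo cs k = pvMarkTo cs (k+1) := by
  apply List.ext_getElem (by simp [pvMarkTo])
  intro i h1 h2
  simp only [pvMarkTo, List.getElem_mapIdx]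
  have hiff : (i < k ∧ pvGood cs i = true) ↔ (i < k + 1 ∧ pvGood cs i = true) := by
    constructor
    · rintro ⟨a, b⟩; exact ⟨by omega, b⟩
    · rintro ⟨a, b⟩
      refine ⟨?_, b⟩
      rcases Nat.lt_or_ge i k with h | h
      · exact h
      · have : i = k := by omega
        subst this; exact absurd b hg
  simp only [hiff]

theorem pvGet_markTo (cs : List Char) (k j : Nat) (h : k ≤ j) :
    PySem.Str.pyGet? (String.ofList (pvMarkTo cs k)) ((j : Nat) : Int) = cs[j]? := by
  simp [PySem.Str.pyGet?, PySem.Chars.pyGet?, pvMarkTo_get_ge cs k j h]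

theorem pvStepEq (cs : List Char) (k : Nat) (h1 : 1 ≤ k) (h2 : k + 1 < cs.length) :
    pvLoopBody (String.ofList (pvMarkTo cs k)) (k : Int) = String.ofList (pvMarkTo cs (k + 1)) := by
  have hk : k < cs.length := by omega
  have hcast : (k : Int) + 1 = ((k+1 : Nat) : Int) := by push_cast; ring
  have hgetk : PySem.Str.pyGet? (String.ofList (pvMarkTo cs k)) (k : Int) = cs[k]? :=
    pvGet_markTo cs k k le_rfl
  have hgetk1 : PySem.Str.pyGet? (String.ofList (pvMarkTo cs k)) ((k : Int) + 1) = cs[k+1]? := by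
    rw [hcast]; exact pvGet_markTo cs k (k+1) (by omega)
  have hcs_k : cs[k]? = some cs[k] := List.getElem?_eq_getElem hk
  have hcs_k1 : cs[k+1]? = some cs[k+1] := List.getElem?_eq_getElem h2
  unfold pvLoopBody
  by_cases hbl : cs[k] = '{' ∧ cs[k+1] = '{'
  · -- "{{" case
    have hg : pvGood cs k = true := by
      simp [pvGood, hbl.1, hbl.2, hcs_k, hcs_k1, h1, h2]
    have hcondA : String.ofList [(PySem.Str.pyGet? (String.ofList (pvMarkTo cs k)) (k : Int)).getD ' ',
        (PySem.Str.pyGet? (String.ofList (pvMarkTo cs k)) ((k : Int) + 1)).getD ' '] = "{{" := by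
      rw [hgetk, hgetk1, hcs_k, hcs_k1]
      simp only [Option.getD_some]
      rw [hbl.1, hbl.2]
    rw [if_pos hcondA]
    rw [show ("¡" : String) = String.ofList ['¡'] from rfl]
    rw [pvSubStringEq _ k '¡' (by rw [pvMarkTo_length]; omega)]
    have hset : (pvMarkTo cs k).set k '¡' = pvMarkTo cs (k+1) := by
      have := pvMarkTo_set cs k hg hk
      rwa [show pvMarker cs[k] = '¡' by simp [pvMarker, hbl.1]] at this
    rw [hset]
    have hget2k : PySem.Str.pyGet? (String.ofList (pvMarkTo cs (k+1))) (k : Int) = some '¡' := by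
      simp only [PySem.Str.pyGet?, String.toList_ofList, PySem.Chars.pyGet?,
        PySem.List.pyGet?_natCast]
      rw [← hset, List.getElem?_set_self (by rw [pvMarkTo_length]; omega)]
    have hget2k1 : PySem.Str.pyGet? (String.ofList (pvMarkTo cs (k+1))) ((k : Int) + 1) = cs[k+1]? := by
      rw [hcast]; exact pvGet_markTo cs (k+1) (k+1) le_rfl
    have hcond2 : ¬ String.ofList [(PySem.Str.pyGet? (String.ofList (pvMarkTo cs (k+1))) (k : Int)).getD ' ',
        (PySem.Str.pyGet? (String.ofList (pvMarkTo cs (k+1))) ((k : Int) + 1)).getD ' '] = "}}" := by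
      rw [hget2k, hget2k1, hcs_k1]
      simp only [Option.getD_some]
      rw [hbl.2]
      intro hcon
      have := String.ofList_inj.mp (hcon.trans (by decide : ("}}" : String) = String.ofList ['}', '}']))
      simp at this
    rw [if_neg hcond2]
  · by_cases hbr : cs[k] = '}' ∧ cs[k+1] = '}'
    · -- "}}" case
      have hg : pvGood cs k = true := by
        simp [pvGood, hbr.1, hbr.2, hcs_k, hcs_k1, h1, h2]
      have hcondNe : ¬ String.ofList [(PySem.Str.pyGet? (String.ofList (pvMarkTo cs k)) (k : Int)).getD ' ',
          (PySem.Str.pyGet? (String.ofList (pvMarkTo cs k)) ((k : Int) + 1)).getD ' '] = "{{" := by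
        rw [hgetk, hgetk1, hcs_k, hcs_k1]
        simp only [Option.getD_some]
        rw [hbr.1, hbr.2]; decide
      rw [if_neg hcondNe]
      have hcondB : String.ofList [(PySem.Str.pyGet? (String.ofList (pvMarkTo cs k)) (k : Int)).getD ' ',
          (PySem.Str.pyGet? (String.ofList (pvMarkTo cs k)) ((k : Int) + 1)).getD ' '] = "}}" := by
        rw [hgetk, hgetk1, hcs_k, hcs_k1]
        simp only [Option.getD_some]
        rw [hbr.1, hbr.2]
      rw [if_pos hcondB]
      rw [show ("™" : String) = String.ofList ['™'] from rfl]
      rw [pvSubStringEq _ k '™' (by rw [pvMarkTo_length]; omega)]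
      have hset : (pvMarkTo cs k).set k '™' = pvMarkTo cs (k+1) := by
        have := pvMarkTo_set cs k hg hk
        rwa [show pvMarker cs[k] = '™' by simp [pvMarker, hbr.1]] at this
      exact congrArg String.ofList hset
    · -- neither doubled brace at k
      have hg : ¬ pvGood cs k = true := by
        intro hgt
        simp only [pvGood, hcs_k, hcs_k1, Bool.and_eq_true, Bool.or_eq_true,
          decide_eq_true_eq, Option.some.injEq] at hgt
        obtain ⟨⟨⟨-, -⟩, heq⟩, hb⟩ := hgt
        rcases hb with hb | hb
        · exact hbl ⟨hb, by rw [heq, hb]⟩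
        · exact hbr ⟨hb, by rw [heq, hb]⟩
      have hne1 : ¬ String.ofList [(PySem.Str.pyGet? (String.ofList (pvMarkTo cs k)) (k : Int)).getD ' ',
          (PySem.Str.pyGet? (String.ofList (pvMarkTo cs k)) ((k : Int) + 1)).getD ' '] = "{{" := by
        rw [hgetk, hgetk1, hcs_k, hcs_k1]
        simp only [Option.getD_some]
        intro hcon
        have := String.ofList_inj.mp (hcon.trans (by decide : ("{{" : String) = String.ofList ['{', '{']))
        simp at this
        exact hbl ⟨this.1, this.2⟩
      rw [if_neg hne1]
      have hne2 : ¬ String.ofList [(PySem.Str.pyGet? (String.ofList (pvMarkTo cs k)) (k : Int)).getD ' ',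
          (PySem.Str.pyGet? (String.ofList (pvMarkTo cs k)) ((k : Int) + 1)).getD ' '] = "}}" := by
        rw [hgetk, hgetk1, hcs_k, hcs_k1]
        simp only [Option.getD_some]
        intro hcon
        have := String.ofList_inj.mp (hcon.trans (by decide : ("}}" : String) = String.ofList ['}', '}']))
        simp at this
        exact hbr ⟨this.1, this.2⟩
      rw [if_neg hne2]
      exact congrArg String.ofList (pvMarkTo_noset cs k hg)

theorem pvFoldEq (cs : List Char) (j : Nat) (hj : j + 1 < cs.length) :
    (PySem.List.pyRange 1 (1 + (j : Int)) 1).foldl pvLoopBody (String.ofList cs)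
      = String.ofList (pvMarkTo cs (j + 1)) := by
  induction j with
  | zero =>
    rw [PySem.List.pyRange_one_eq_nil (by omega)]
    simp [pvMarkTo_one]
  | succ m ih =>
    have hm : m + 1 < cs.length := by omega
    have hsplit : (1 : Int) + ((m + 1 : Nat) : Int) = (1 + (m : Int)) + 1 := by push_cast; ring
    rw [hsplit, PySem.List.pyRange_one_succ_right (a := 1) (b := 1 + (m : Int)) (by push_cast; omega)]
    rw [List.foldl_append, ih hm]
    have : (1 + (m : Int)) = ((m + 1 : Nat) : Int) := by push_cast; ring
    simp only [List.foldl_cons, List.foldl_nil, this]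
    have hstep := pvStepEq cs (m+1) (by omega) (by omega)
    exact hstep

def pvSubst (c : Char) : List Char :=
  if c = '¡' then ['{', ' '] else if c = '™' then ['}', ' '] else [c]

theorem pvFlatMapCongrMem {α β : Type} (l : List α) (f g : α → List β)
    (h : ∀ a ∈ l, f a = g a) : l.flatMap f = l.flatMap g := by
  induction l with
  | nil => rfl
  | cons x xs ih =>
    simp only [List.flatMap_cons, h x (List.mem_cons_self), ih (fun a ha => h a (List.mem_cons_of_mem _ ha))]

theorem pvReplaceGoSingle (m : Char) (new : List Char) :
    ∀ (fuel : Nat) (l acc : List Char), l.length ≤ fuel →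
    PySem.Chars.replace.go [m] new fuel l acc
      = acc.reverse ++ l.flatMap (fun c => if c = m then new else [c]) := by
  intro fuel
  induction fuel with
  | zero => intro l acc h; simp at h; simp [h, PySem.Chars.replace.go]
  | succ n ih =>
    intro l acc h
    cases l with
    | nil => simp [PySem.Chars.replace.go]
    | cons c t =>
      rw [PySem.Chars.replace.go]
      by_cases hc : c = m
      · subst hc
        simp only [List.isPrefixOf, beq_self_eq_true, Bool.true_and, if_pos]
        rw [ih _ _ (by simpa using Nat.le_of_succ_le_succ h)]
        simp
      · have : List.isPrefixOf [m] (c :: t) = false := by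
          simp [List.isPrefixOf]; intro hh; exact absurd hh.symm hc
        rw [this]
        simp only [Bool.false_eq_true, if_false]
        rw [ih _ _ (by simpa using Nat.le_of_succ_le_succ h)]
        simp [hc]

theorem pvReplaceSingle (m : Char) (new l : List Char) :
    PySem.Chars.replace l [m] new = l.flatMap (fun c => if c = m then new else [c]) := by
  rw [PySem.Chars.replace]
  simp [pvReplaceGoSingle m new l.length l [] (le_refl _)]

-- replacing '¡' then '™' on any list equals one flatMap with pvSubst
theorem pvReplaceTwice (l : List Char) :
    PySem.Chars.replace (PySem.Chars.replace l ['¡'] ['{', ' ']) ['™'] ['}', ' ']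
      = l.flatMap pvSubst := by
  rw [pvReplaceSingle, pvReplaceSingle, List.flatMap_assoc]
  apply pvFlatMapCongrMem
  intro c _
  by_cases h1 : c = '¡'
  · subst h1; decide
  · by_cases h2 : c = '™'
    · subst h2; decide
    · simp [pvSubst, h1, h2]

-- ===== VERDICT (by name: the statement is the Claim_ definition above) =====
theorem largeBracketsSpacer_spec : Claim_equal_largeBracketsSpacer := by
  intro line hdom
  unfold Spec_largeBracketsSpacer
  unfold Dom_largeBracketsSpacer at hdom
  have hchar : ∀ c ∈ line.toList, pvDomChar c = true := by
    unfold pvDomStr at hdom; simpa [List.all_eq_true] using hdom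
  -- A side: the fold marks every good position
  have hfold : (PySem.List.pyRange 1 (PySem.Str.len line - 1) 1).foldl pvLoopBody line
      = String.ofList (pvMarkAll line.toList) := by
    rw [PySem.Str.len_eq]
    rcases Nat.lt_or_ge line.toList.length 3 with hn | hn
    · rw [PySem.List.pyRange_one_eq_nil (by omega)]
      simp only [List.foldl_nil]
      rw [pvMarkAll_short _ (by omega), String.ofList_toList]
    · have h2 : ((line.toList.length : Int) - 1) = 1 + ((line.toList.length - 2 : Nat) : Int) := by
        omega
      rw [h2]
      have hf := pvFoldEq line.toList (line.toList.length - 2) (by omega)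
      rw [String.ofList_toList] at hf
      rw [hf]
      rw [show line.toList.length - 2 + 1 = line.toList.length - 1 by omega]
      rw [pvMarkTo_eq_all _ _ (by omega)]
  unfold largeBracketsSpacer largeBracketsSpacer_alt
  rw [hfold]
  -- A side: the two replaces
  have hA : PySem.Str.replace (PySem.Str.replace (String.ofList (pvMarkAll line.toList)) "¡" "{ ") "™" "} "
      = String.ofList ((pvMarkAll line.toList).flatMap pvSubst) := by
    simp only [PySem.Str.replace, String.toList_ofList]
    rw [show ("¡" : String).toList = ['¡'] from rfl, show ("™" : String).toList = ['™'] from rfl,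
        show ("{ " : String).toList = ['{', ' '] from rfl, show ("} " : String).toList = ['}', ' '] from rfl]
    exact congrArg String.ofList (pvReplaceTwice (pvMarkAll line.toList))
  rw [hA]
  -- B side: join of the mapped pieces is a flatMap
  rw [PySem.Str.join]
  rw [show ("" : String).toList = [] from rfl]
  rw [List.map_map, pvJoinNil, ← List.flatMap_def]
  apply congrArg String.ofList
  -- reduce both sides to flatMaps over zipIdx
  rw [pvMarkAll, List.mapIdx_eq_zipIdx_map, List.flatMap_map]
  rw [PySem.List.enumerate_eq_zipIdx_map, List.flatMap_map]
  apply pvFlatMapCongrMem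
  rintro ⟨a, i⟩ hmem
  obtain ⟨-, hi, ha⟩ := List.mem_zipIdx hmem
  simp only [Nat.sub_zero] at hi ha
  simp only [ha]
  have hdomc : pvDomChar line.toList[i] = true := hchar _ (List.getElem_mem _)
  simp only [Function.comp]
  by_cases hg : pvGood line.toList i = true
  · -- marked position
    have hg' := hg
    simp only [pvGood, Bool.and_eq_true, Bool.or_eq_true, decide_eq_true_eq] at hg'
    obtain ⟨⟨⟨hg1, hg2⟩, hg3⟩, hg4⟩ := hg'
    have hcond : (1 : Int) ≤ 0 + (i : Int) ∧ (0 + (i : Int)) < (PySem.Str.len line) - 1 ∧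
        PySem.Str.pyGet? line ((0 + (i : Int)) + 1) = some line.toList[i] ∧
        (line.toList[i] = '{' ∨ line.toList[i] = '}') := by
      refine ⟨by omega, by rw [PySem.Str.len_eq]; omega, ?_, ?_⟩
      · rw [show (0 + (i : Int)) + 1 = ((i + 1 : Nat) : Int) by omega]
        simp only [PySem.Str.pyGet?, PySem.Chars.pyGet?, PySem.List.pyGet?_natCast]
        rw [hg3]
        exact List.getElem?_eq_getElem (by omega)
      · have hsome : line.toList[i]? = some line.toList[i] := List.getElem?_eq_getElem (by omega)
        rcases hg4 with h | h
        · left; rw [hsome] at h; exact Option.some.inj h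
        · right; rw [hsome] at h; exact Option.some.inj h
    rw [if_pos hg, if_pos hcond]
    rcases hcond.2.2.2 with h | h
    · rw [h]; simp [pvMarker, pvSubst]
    · rw [h]
      have : pvMarker '}' = '™' := by decide
      simp [pvMarker, pvSubst, h]
  · -- unmarked position
    rw [if_neg hg]
    have hcond : ¬ ((1 : Int) ≤ 0 + (i : Int) ∧ (0 + (i : Int)) < (PySem.Str.len line) - 1 ∧
        PySem.Str.pyGet? line ((0 + (i : Int)) + 1) = some line.toList[i] ∧
        (line.toList[i] = '{' ∨ line.toList[i] = '}')) := by
      rintro ⟨hc1, hc2, hc3, hc4⟩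
      apply hg
      rw [PySem.Str.len_eq] at hc2
      have hsome : line.toList[i]? = some line.toList[i] := List.getElem?_eq_getElem (by omega)
      have hget : line.toList[i+1]? = some line.toList[i] := by
        rw [show (0 + (i : Int)) + 1 = ((i + 1 : Nat) : Int) by omega] at hc3
        simpa only [PySem.Str.pyGet?, PySem.Chars.pyGet?, PySem.List.pyGet?_natCast] using hc3
      simp only [pvGood, Bool.and_eq_true, Bool.or_eq_true, decide_eq_true_eq]
      refine ⟨⟨⟨by omega, by omega⟩, by rw [hget, hsome]⟩, ?_⟩
      rcases hc4 with h | h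
      · left; rw [hsome, h]
      · right; rw [hsome, h]
    rw [if_neg hcond]
    have h1 : line.toList[i] ≠ '¡' := by
      intro hcon; rw [hcon] at hdomc; simp [pvDomChar] at hdomc
    have h2 : line.toList[i] ≠ '™' := by
      intro hcon; rw [hcon] at hdomc; simp [pvDomChar] at hdomc
    simp [pvSubst, h1, h2]
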